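-- pv_equiv track=rewrite | github.com/AnJunHao/zftracker | zftracker/util/nn.py | get_final_output
-- ===== SOURCE A (Python) =====
-- def get_deconv_output(input, stride, padding, dilation, kernel_size, out_padding):
--     return (
--         (input - 1) * stride
--         - 2 * padding
--         + dilation * (kernel_size - 1)
--         + out_padding
--         + 1
--     )
--
-- def get_final_output(input, padding, out_padding):
--     for i in range(3):
--         input = get_deconv_output(
--             input,
--             2,
--             padding=padding[i],
--             dilation=1,
--             kernel_size=4,
--             out_padding=out_padding[i],
--         )
--     return input
-- ===== SOURCE B (Python) =====
-- def get_final_output(input, padding, out_padding):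
--     # closed form: three deconv steps with stride 2, dilation 1, kernel 4
--     # each step maps x -> 2*x + (2 - 2*p + q)
--     return (8 * input
--             + 4 * (2 - 2 * padding[0] + out_padding[0])
--             + 2 * (2 - 2 * padding[1] + out_padding[1])
--             + (2 - 2 * padding[2] + out_padding[2]))
-- ===== Notes on version B (the rewrite author's own statement) =====
-- stated objective: simpler
-- what changed: Replaced the 3-iteration loop over the deconv helper by a single closed-form arithmetic expression 8*input + 4*c0 + 2*c1 + c2 with ci = 2 - 2*padding[i] + out_padding[i].
import Mathlib
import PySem

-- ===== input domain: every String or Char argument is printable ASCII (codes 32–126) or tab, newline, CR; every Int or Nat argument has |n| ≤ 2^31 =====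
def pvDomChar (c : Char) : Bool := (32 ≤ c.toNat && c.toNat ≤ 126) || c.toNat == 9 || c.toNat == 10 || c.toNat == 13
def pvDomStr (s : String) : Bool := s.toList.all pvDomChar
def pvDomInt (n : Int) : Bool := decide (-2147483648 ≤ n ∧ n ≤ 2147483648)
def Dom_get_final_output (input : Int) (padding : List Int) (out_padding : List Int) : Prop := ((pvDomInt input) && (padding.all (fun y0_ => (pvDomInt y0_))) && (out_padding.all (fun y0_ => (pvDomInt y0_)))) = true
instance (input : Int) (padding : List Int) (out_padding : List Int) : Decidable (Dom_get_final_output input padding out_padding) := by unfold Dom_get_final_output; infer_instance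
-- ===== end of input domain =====

-- B replaces A's 3-iteration loop over the deconv helper by one flat closed-form expression (objective: simpler).

-- ===== PORT A =====
-- helper get_deconv_output, literal
def get_deconv_output (input stride padding dilation kernel_size out_padding : Int) : Int :=
  (input - 1) * stride - 2 * padding + dilation * (kernel_size - 1) + out_padding + 1

-- the for-loop over range(3); padding[i]/out_padding[i] may raise IndexError → Option (none = raise)
def get_final_output_loop (padding out_padding : List Int) (st : Option Int) (i : Int) : Option Int :=
  match st with
  | none => none
  | some x =>
    match PySem.List.pyGet? padding i, PySem.List.pyGet? out_padding i with
    | some p, some q => some (get_deconv_output x 2 p 1 4 q)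
    | _, _ => none

def get_final_output (input : Int) (padding : List Int) (out_padding : List Int) : Int :=
  ((PySem.List.pyRange 0 3 1).foldl (get_final_output_loop padding out_padding) (some input)).getD 0

-- ===== PORT B =====
def get_final_output_alt (input : Int) (padding : List Int) (out_padding : List Int) : Int :=
  8 * input
    + 4 * (2 - 2 * ((PySem.List.pyGet? padding 0).getD 0) + ((PySem.List.pyGet? out_padding 0).getD 0))
    + 2 * (2 - 2 * ((PySem.List.pyGet? padding 1).getD 0) + ((PySem.List.pyGet? out_padding 1).getD 0))
    + (2 - 2 * ((PySem.List.pyGet? padding 2).getD 0) + ((PySem.List.pyGet? out_padding 2).getD 0))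

-- ===== PRECONDITION & SPEC =====
-- A (and B) raise IndexError when either list has fewer than 3 elements; exactly those inputs are excluded.
def Pre_get_final_output (input : Int) (padding : List Int) (out_padding : List Int) : Prop :=
  3 ≤ padding.length ∧ 3 ≤ out_padding.length
instance (input : Int) (padding : List Int) (out_padding : List Int) : Decidable (Pre_get_final_output input padding out_padding) := by unfold Pre_get_final_output; infer_instance

def pvWitness_get_final_output : Int × List Int × List Int := (7, [1, 0, 1], [0, 1, 1])

def Spec_get_final_output (input : Int) (padding : List Int) (out_padding : List Int) (out : Int) : Prop := out = get_final_output_alt input padding out_padding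
instance (input : Int) (padding : List Int) (out_padding : List Int) (out : Int) : Decidable (Spec_get_final_output input padding out_padding out) := by unfold Spec_get_final_output; infer_instance

-- ===== CLAIM (what is proved, stated in full; the proofs are below) =====
def Claim_equal_get_final_output : Prop := ∀ (input : Int) (padding : List Int) (out_padding : List Int), Dom_get_final_output input padding out_padding → Pre_get_final_output input padding out_padding → Spec_get_final_output input padding out_padding (get_final_output input padding out_padding)

-- ===== LEMMAS AND PROOFS =====

-- ===== VERDICT (by name: the statement is the Claim_ definition above) =====
theorem get_final_output_spec : Claim_equal_get_final_output := by
  intro input padding out_padding _ hpre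
  obtain ⟨hp, hq⟩ := hpre
  match padding, out_padding with
  | p0 :: p1 :: p2 :: tp, q0 :: q1 :: q2 :: tq =>
    have hr : PySem.List.pyRange 0 3 1 = [0, 1, 2] := by decide
    have g : ∀ (a b c : Int) (t : List Int),
        PySem.List.pyGet? (a::b::c::t) 0 = some a ∧
        PySem.List.pyGet? (a::b::c::t) 1 = some b ∧
        PySem.List.pyGet? (a::b::c::t) 2 = some c := by
      intro a b c t
      refine ⟨?_, ?_, ?_⟩ <;>
        simp [PySem.List.pyGet?, PySem.List.pyIdx?,
          show (0:Int) ≤ (t.length:Int) + 1 + 1 from by omega,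
          show (0:Int) ≤ (t.length:Int) + 1 from by omega,
          show (2:Int) ≤ (t.length:Int) + 1 + 1 from by omega]
    obtain ⟨gp0, gp1, gp2⟩ := g p0 p1 p2 tp
    obtain ⟨gq0, gq1, gq2⟩ := g q0 q1 q2 tq
    simp [Spec_get_final_output, get_final_output, get_final_output_alt, hr,
      get_final_output_loop, get_deconv_output, gp0, gp1, gp2, gq0, gq1, gq2]
    ring
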